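-- pv_equiv track=rewrite | github.com/bachmt28/k8s-autoscaler | autoscaler/ctf_parser.py | _normalize_days
-- ===== SOURCE A (Python) =====
-- from typing import List, Optional
--
-- def _normalize_days(day_str: str) -> List[str]:
--     """
--     Convert: "Mon-Fri" -> ["Mon", "Tue", "Wed", "Thu", "Fri"]
--              "Sat-Sun" -> ["Sat", "Sun"]
--              "Mon,Wed,Fri" -> ["Mon", "Wed", "Fri"]
--     """
--     day_map = ["Mon", "Tue", "Wed", "Thu", "Fri", "Sat", "Sun"]
--     result = []
--     if "-" in day_str:
--         start, end = day_str.split("-")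
--         if start not in day_map or end not in day_map:
--             return []
--         start_idx = day_map.index(start)
--         end_idx = day_map.index(end)
--         if start_idx <= end_idx:
--             result = day_map[start_idx:end_idx + 1]
--         else:
--             result = day_map[start_idx:] + day_map[:end_idx + 1]
--     elif "," in day_str:
--         result = [d for d in day_str.split(",") if d in day_map]
--     else:
--         result = [day_str] if day_str in day_map else []
--     return result
-- ===== SOURCE B (Python) =====
-- _SUCC = {"Mon": "Tue", "Tue": "Wed", "Wed": "Thu", "Thu": "Fri",
--          "Fri": "Sat", "Sat": "Sun", "Sun": "Mon"}
--
-- def _normalize_days(day_str: str):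
--     if "-" in day_str:
--         start, end = day_str.split("-")
--         if start not in _SUCC or end not in _SUCC:
--             return []
--         out = [start]
--         d = start
--         while d != end:
--             d = _SUCC[d]
--             out.append(d)
--         return out
--     if "," in day_str:
--         return [d for d in day_str.split(",") if d in _SUCC]
--     return [day_str] if day_str in _SUCC else []
-- ===== Notes on version B (the rewrite author's own statement) =====
-- stated objective: alternative
-- what changed: The range branch drops indices and slices entirely: B stores the week as a cyclic successor map and walks succ-pointers from the start day until it reaches the end day, appending each visited day (and membership tests use the map's keys instead of the list).
import Mathlib
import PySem

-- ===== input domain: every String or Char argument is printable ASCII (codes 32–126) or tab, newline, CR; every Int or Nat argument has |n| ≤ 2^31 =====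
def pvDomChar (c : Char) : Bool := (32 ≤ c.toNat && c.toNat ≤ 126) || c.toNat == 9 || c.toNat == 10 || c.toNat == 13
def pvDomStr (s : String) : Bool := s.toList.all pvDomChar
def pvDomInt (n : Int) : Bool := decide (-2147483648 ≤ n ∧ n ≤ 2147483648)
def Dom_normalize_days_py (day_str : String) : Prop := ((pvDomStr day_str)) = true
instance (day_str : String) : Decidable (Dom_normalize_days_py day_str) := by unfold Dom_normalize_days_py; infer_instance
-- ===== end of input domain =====

-- B replaces A's index/slice range computation by a cyclic successor-map walk; alternative decomposition, same cost.


-- ===== PORT A =====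
-- the literal day_map list of A
def pvDayMap : List String := ["Mon", "Tue", "Wed", "Thu", "Fri", "Sat", "Sun"]

-- the '-' branch of A, applied to day_str.split("-"); the `| _ => []` arm is where Python's
-- 2-tuple unpacking raises ValueError (excluded by Pre_)
def normADash (parts : List String) : List String :=
  match parts with
  | [start, stop] =>
    if start ∉ pvDayMap ∨ stop ∉ pvDayMap then []
    else
      let start_idx := (PySem.List.index? pvDayMap start).getD 0
      let end_idx := (PySem.List.index? pvDayMap stop).getD 0
      if start_idx ≤ end_idx then
        PySem.List.slice pvDayMap (some (start_idx : Int)) (some ((end_idx : Int) + 1))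
      else
        PySem.List.slice pvDayMap (some (start_idx : Int)) none ++
          PySem.List.slice pvDayMap none (some ((end_idx : Int) + 1))
  | _ => []

def normalize_days_py (day_str : String) : List String :=
  if PySem.Str.isIn "-" day_str then
    normADash ((PySem.Str.split? day_str "-").getD [])
  else if PySem.Str.isIn "," day_str then
    ((PySem.Str.split? day_str ",").getD []).filter (fun d => decide (d ∈ pvDayMap))
  else if day_str ∈ pvDayMap then [day_str] else []

-- ===== PORT B =====
-- B's cyclic successor map (the module-level _SUCC dict of Source B)
def pvSucc : PySem.Dict String String :=
  PySem.Dict.ofList [("Mon", "Tue"), ("Tue", "Wed"), ("Wed", "Thu"), ("Thu", "Fri"),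
                     ("Fri", "Sat"), ("Sat", "Sun"), ("Sun", "Mon")]

-- the while loop of Source B: follow succ pointers until reaching `stop`; fuel 7 bounds the walk
-- (from a valid start the cycle reaches every valid stop in ≤ 6 steps, so the fuel never runs out)
def normBWalk : Nat → String → String → List String
  | 0, _, _ => []
  | n + 1, d, stop =>
    if d == stop then []
    else
      let d' := (PySem.Dict.get? pvSucc d).getD ""
      d' :: normBWalk n d' stop

-- the '-' branch of B
def normBDash (parts : List String) : List String :=
  match parts with
  | [start, stop] =>
    if ¬ PySem.Dict.contains pvSucc start ∨ ¬ PySem.Dict.contains pvSucc stop then []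
    else start :: normBWalk 7 start stop
  | _ => []

def normalize_days_py_alt (day_str : String) : List String :=
  if PySem.Str.isIn "-" day_str then
    normBDash ((PySem.Str.split? day_str "-").getD [])
  else if PySem.Str.isIn "," day_str then
    ((PySem.Str.split? day_str ",").getD []).filter (fun d => decide (PySem.Dict.contains pvSucc d))
  else if PySem.Dict.contains pvSucc day_str then [day_str] else []

-- ===== PRECONDITION & SPEC =====
-- Pre_ excludes exactly the strings containing '-' at least twice: there `start, end = day_str.split("-")` raises ValueError in both Pythons.
def Pre_normalize_days_py (day_str : String) : Prop := PySem.Str.count day_str "-" ≤ 1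
instance (day_str : String) : Decidable (Pre_normalize_days_py day_str) := by unfold Pre_normalize_days_py; infer_instance
def pvWitness_normalize_days_py : String := "Fri-Mon"

def Spec_normalize_days_py (day_str : String) (out : List String) : Prop := out = normalize_days_py_alt day_str
instance (day_str : String) (out : List String) : Decidable (Spec_normalize_days_py day_str out) := by unfold Spec_normalize_days_py; infer_instance

-- ===== CLAIM =====
def Claim_equal_normalize_days_py : Prop := ∀ (day_str : String), Dom_normalize_days_py day_str → Pre_normalize_days_py day_str → Spec_normalize_days_py day_str (normalize_days_py day_str)

-- ===== LEMMAS AND PROOFS =====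
-- membership in A's day_map list coincides with being a key of B's successor map
theorem contains_eq (s : String) : PySem.Dict.contains pvSucc s = decide (s ∈ pvDayMap) := by
  have h : pvSucc = PySem.Dict.mk [("Mon", "Tue"), ("Tue", "Wed"), ("Wed", "Thu"), ("Thu", "Fri"),
                     ("Fri", "Sat"), ("Sat", "Sun"), ("Sun", "Mon")] := by rfl
  rw [h, Bool.eq_iff_iff]
  simp [pvDayMap, @eq_comm String s]

-- the two '-'-branch helpers agree on every parts list (49 concrete day pairs, checked by the kernel)
theorem normDash_eq (parts : List String) : normADash parts = normBDash parts := by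
  match parts with
  | [] => rfl
  | [_] => rfl
  | _ :: _ :: _ :: _ => rfl
  | [a, b] =>
    unfold normADash normBDash
    simp only [contains_eq]
    by_cases ha : a ∈ pvDayMap
    · by_cases hb : b ∈ pvDayMap
      · fin_cases ha <;> fin_cases hb <;> decide
      · simp [ha, hb]
    · simp [ha]

-- ===== VERDICT =====
theorem normalize_days_py_spec : Claim_equal_normalize_days_py := by
  intro day_str _ _
  unfold Spec_normalize_days_py normalize_days_py normalize_days_py_alt
  rw [normDash_eq]
  simp only [contains_eq, decide_eq_true_eq]
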